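-- pv_equiv track=rewrite | github.com/asb50/Trabajo-de-FMSD-1 | tiempo.py | Provincias
-- ===== SOURCE A (Python) =====
-- def Provincias(listadic):
--     listaprovincias = []
--     listaprovincias.append(listadic[0]['provincia'])
--     i = 1
--     aux = 0
--
--     while i<len(listadic):
--         if listadic[i]['provincia'] == listaprovincias[aux]:
--             i = i+1
--         else:
--             listaprovincias.append(listadic[i]['provincia'])
--             aux = aux + 1
--             i = i+1
--     return listaprovincias
-- ===== SOURCE B (Python) =====
-- def Provincias(listadic):
--     provs = [d['provincia'] for d in listadic]
--     out = []
--     n = len(provs)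
--     i = 0
--     while i < n:
--         out.append(provs[i])
--         j = i
--         while j < n and provs[j] == provs[i]:
--             j += 1
--         i = j
--     return out
-- ===== Notes on version B (the rewrite author's own statement) =====
-- stated objective: alternative
-- what changed: Replaces A's compare-to-last-appended single pass (index i plus aux pointer into the output) with run-grouping: an outer loop over run starts and an inner loop that skips each maximal run of equal provinces, appending one representative per run; no state about the output list is consulted.
import Mathlib
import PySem

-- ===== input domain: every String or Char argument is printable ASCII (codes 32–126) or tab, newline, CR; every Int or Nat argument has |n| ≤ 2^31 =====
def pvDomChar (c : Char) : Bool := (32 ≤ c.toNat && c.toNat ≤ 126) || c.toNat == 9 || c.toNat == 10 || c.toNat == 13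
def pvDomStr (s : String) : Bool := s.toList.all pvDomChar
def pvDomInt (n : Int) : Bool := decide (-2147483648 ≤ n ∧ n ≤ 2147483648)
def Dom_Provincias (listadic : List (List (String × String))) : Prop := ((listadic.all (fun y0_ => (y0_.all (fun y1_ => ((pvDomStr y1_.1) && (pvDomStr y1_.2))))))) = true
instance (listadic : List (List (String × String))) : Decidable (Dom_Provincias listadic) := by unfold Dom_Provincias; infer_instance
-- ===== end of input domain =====

-- B replaces A's compare-to-last-appended pass with run-grouping (outer loop over run
-- starts, inner loop skipping each maximal run); same cost, return value proved equal on Pre_.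

-- dict[str,str] is an association list; d['provincia'] = first match (none = KeyError, excluded by Pre_)
def pvLookup (d : List (String × String)) (k : String) : Option String :=
  (d.find? (fun kv => kv.1 == k)).map (·.2)

-- ===== PORT A =====
-- the while loop: state (i, listaprovincias, aux), literal transliteration
def provLoopA (listadic : List (List (String × String))) (i : Nat)
    (listaprovincias : List String) (aux : Int) : List String :=
  if _h : i < listadic.length then
    if (pvLookup listadic[i] "provincia").getD "" == (PySem.List.pyGet? listaprovincias aux).getD "" then
      provLoopA listadic (i + 1) listaprovincias aux
    else
      provLoopA listadic (i + 1) (listaprovincias ++ [(pvLookup listadic[i] "provincia").getD ""]) (aux + 1)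
  else listaprovincias
termination_by listadic.length - i

def Provincias (listadic : List (List (String × String))) : List String :=
  provLoopA listadic 1 [(pvLookup ((PySem.List.pyGet? listadic 0).getD []) "provincia").getD ""] 0

-- ===== PORT B =====
-- inner while loop of Source B: advance j past the maximal run of value v starting at j
def runEnd (provs : List String) (v : String) (j : Nat) : Nat :=
  if h : j < provs.length then
    if provs[j] == v then runEnd provs v (j + 1) else j
  else j
termination_by provs.length - j

-- termination fact the outer loop cites: runEnd never moves backwards
theorem runEnd_ge (provs : List String) (v : String) : ∀ j, j ≤ runEnd provs v j := by
  intro j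
  induction hn : provs.length - j using Nat.strong_induction_on generalizing j with
  | _ n ih =>
  rw [runEnd]
  by_cases h : j < provs.length
  · simp only [h, dif_pos]
    by_cases he : provs[j] == v
    · simp only [he, if_pos]
      exact le_trans (by omega) (ih (provs.length - (j+1)) (by omega) (j+1) rfl)
    · simp [he]
  · simp [h]

-- outer while loop of Source B: append one representative per run, jump to the next run start
def outerLoop (provs : List String) (i : Nat) (out : List String) : List String :=
  if h : i < provs.length then
    outerLoop provs (runEnd provs provs[i] i) (out ++ [provs[i]])
  else out
termination_by provs.length - i
decreasing_by
  have h1 : i + 1 ≤ runEnd provs provs[i] i := by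
    rw [runEnd]; simp only [h, dif_pos, BEq.rfl, if_pos]
    exact runEnd_ge provs provs[i] (i + 1)
  omega

def Provincias_alt (listadic : List (List (String × String))) : List String :=
  outerLoop (listadic.map (fun d => (pvLookup d "provincia").getD "")) 0 []

-- ===== PRECONDITION & SPEC =====
-- exactly where Python A returns: a nonempty list (else IndexError) whose every dict has key 'provincia' (else KeyError)
def Pre_Provincias (listadic : List (List (String × String))) : Prop :=
  listadic ≠ [] ∧ ∀ d ∈ listadic, (d.any (fun kv => kv.1 == "provincia")) = true
instance (listadic : List (List (String × String))) : Decidable (Pre_Provincias listadic) := by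
  unfold Pre_Provincias; infer_instance

def pvWitness_Provincias : (List (List (String × String))) := [[("provincia", "a")], [("provincia", "b")]]

def Spec_Provincias (listadic : List (List (String × String))) (out : List String) : Prop := out = Provincias_alt listadic
instance (listadic : List (List (String × String))) (out : List String) : Decidable (Spec_Provincias listadic out) := by unfold Spec_Provincias; infer_instance

-- ===== CLAIM (what is proved, stated in full; the proofs are below) =====
def Claim_equal_Provincias : Prop := ∀ (listadic : List (List (String × String))), Dom_Provincias listadic → Pre_Provincias listadic → Spec_Provincias listadic (Provincias listadic)

-- ===== LEMMAS AND PROOFS =====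

-- consecutive dedup relative to the last kept element: characterisation of A's loop
def ded (last : String) : List String → List String
  | [] => []
  | p :: ps => if p == last then ded last ps else p :: ded p ps

theorem provLoopA_eq (listadic : List (List (String × String))) :
    ∀ (i : Nat) (rest : List String) (last : String), i ≤ listadic.length →
    provLoopA listadic i (rest ++ [last]) (rest.length : Int) =
      (rest ++ [last]) ++ ded last ((listadic.drop i).map (fun d => (pvLookup d "provincia").getD "")) := by
  intro i
  induction hn : listadic.length - i using Nat.strong_induction_on generalizing i with
  | _ n ih =>
  intro rest last hi
  rw [provLoopA]
  by_cases h : i < listadic.length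
  · rw [List.drop_eq_getElem_cons h]
    simp only [h, dif_pos, List.map_cons]
    rw [PySem.List.pyGet?_append_length]
    simp only [Option.getD_some]
    set p := (pvLookup listadic[i] "provincia").getD "" with hp
    by_cases he : p = last
    · rw [if_pos (by simpa using he)]
      rw [ih (listadic.length - (i+1)) (by omega) (i+1) (by omega) rest last (by omega)]
      simp [ded, he]
    · rw [if_neg (by simpa using he)]
      have : (rest.length : Int) + 1 = (((rest ++ [last]).length : Nat) : Int) := by
        simp
      rw [this, ih (listadic.length - (i+1)) (by omega) (i+1) (by omega) (rest ++ [last]) p (by omega)]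
      simp [ded, he]
  · simp only [h, dif_neg, not_false_iff]
    have : listadic.drop i = [] := List.drop_eq_nil_of_le (by omega)
    simp [this, ded]

-- run-grouping on a plain list: one key per maximal run (proof-side description of B's loops)
def runsKeys : List String → List String
  | [] => []
  | p :: ps => p :: runsKeys (ps.dropWhile (· == p))
termination_by ps => ps.length
decreasing_by exact Nat.lt_succ_of_le (List.length_dropWhile_le _ _)

theorem runEnd_drop (provs : List String) (v : String) :
    ∀ j, provs.drop (runEnd provs v j) = (provs.drop j).dropWhile (· == v) := by
  intro j
  induction hn : provs.length - j using Nat.strong_induction_on generalizing j with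
  | _ n ih =>
  rw [runEnd]
  by_cases h : j < provs.length
  · rw [List.drop_eq_getElem_cons h]
    simp only [h, dif_pos]
    by_cases he : provs[j] == v
    · simp only [he, if_pos, List.dropWhile_cons_of_pos]
      exact ih (provs.length - (j+1)) (by omega) (j+1) rfl
    · simp only [he, if_neg, Bool.not_eq_true]
      rw [List.dropWhile_cons_of_neg (by simpa using he), ← List.drop_eq_getElem_cons h]
  · have : provs.drop j = [] := List.drop_eq_nil_of_le (by omega)
    simp [h, this]

theorem outerLoop_eq (provs : List String) :
    ∀ (i : Nat) (out : List String),
    outerLoop provs i out = out ++ runsKeys (provs.drop i) := by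
  intro i
  induction hn : provs.length - i using Nat.strong_induction_on generalizing i with
  | _ n ih =>
  intro out
  rw [outerLoop]
  by_cases h : i < provs.length
  · simp only [h, dif_pos]
    have hgt : i + 1 ≤ runEnd provs provs[i] i := by
      rw [runEnd]; simp only [h, dif_pos, BEq.rfl, if_pos]
      exact runEnd_ge provs provs[i] (i + 1)
    rw [ih (provs.length - runEnd provs provs[i] i) (by omega) (runEnd provs provs[i] i) rfl]
    rw [runEnd_drop]
    rw [List.drop_eq_getElem_cons h, runsKeys]
    rw [List.dropWhile_cons_of_pos (by simp)]
    simp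
  · have : provs.drop i = [] := List.drop_eq_nil_of_le (by omega)
    simp [h, this, runsKeys]

theorem ded_eq_runsKeys (ps : List String) :
    ∀ last, ded last ps = runsKeys (ps.dropWhile (· == last)) := by
  induction ps with
  | nil => intro last; simp [ded, runsKeys]
  | cons p ps ih =>
    intro last
    rw [List.dropWhile_cons]
    by_cases he : p == last
    · simp only [he, if_pos, ded]
      exact ih last
    · simp only [he, if_neg, Bool.false_eq_true, not_false_iff, ded, runsKeys]
      rw [ih p]

-- ===== VERDICT (by name: the statement is the Claim_ definition above) =====
theorem Provincias_spec : Claim_equal_Provincias := by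
  intro listadic _hdom hpre
  obtain ⟨hne, -⟩ := hpre
  obtain ⟨d, t, rfl⟩ := List.exists_cons_of_ne_nil hne
  unfold Spec_Provincias Provincias Provincias_alt
  have hA := provLoopA_eq (d :: t) 1 [] ((pvLookup d "provincia").getD "") (by simp)
  simp only [List.nil_append, List.length_nil, Nat.cast_zero] at hA
  rw [outerLoop_eq, List.drop_zero, List.map_cons, runsKeys, ← ded_eq_runsKeys]
  simp only [PySem.List.pyGet?_zero_cons, Option.getD_some]
  rw [hA]
  simp
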